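-- pv_equiv track=rewrite | github.com/Traftmine/AdventOfCode | Day4/day4_part1.py | check
-- ===== SOURCE A (Python) =====
-- def check(input:list,output:list):
--     cmpt = 0
--     for e in input:
--         if output.count(e) >= 1:
--             if cmpt == 0:
--                 cmpt += 1
--             else:
--                 cmpt *=2
--     return cmpt
-- ===== SOURCE B (Python) =====
-- def check(input: list, output: list):
--     k = sum(1 for e in input if output.count(e) >= 1)
--     return 0 if k == 0 else 2 ** (k - 1)
-- ===== Notes on version B (the rewrite author's own statement) =====
-- stated objective: simpler
-- what changed: Replaces the in-loop accumulator (set-to-1-then-double) by a single count of matching elements followed by a closed-form 2^(k-1).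
import Mathlib
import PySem

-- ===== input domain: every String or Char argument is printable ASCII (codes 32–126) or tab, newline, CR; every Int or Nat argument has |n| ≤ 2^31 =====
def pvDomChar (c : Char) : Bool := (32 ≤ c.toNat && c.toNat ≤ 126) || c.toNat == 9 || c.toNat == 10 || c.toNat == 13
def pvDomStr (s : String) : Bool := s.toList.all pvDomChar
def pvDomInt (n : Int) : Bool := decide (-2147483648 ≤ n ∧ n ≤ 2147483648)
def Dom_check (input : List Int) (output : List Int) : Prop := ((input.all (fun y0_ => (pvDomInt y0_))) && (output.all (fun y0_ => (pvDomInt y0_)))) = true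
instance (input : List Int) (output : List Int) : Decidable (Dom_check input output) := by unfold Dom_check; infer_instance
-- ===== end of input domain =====

-- B replaces A's in-loop accumulator (set-to-1-then-double) by a count of matching elements and a closed-form 2^(k-1); objective: simpler.


-- ===== PORT A =====
-- A: loop over input; on each element contained in output, set the accumulator to 1 if it is 0, else double it.
def check (input : List Int) (output : List Int) : Int :=
  input.foldl
    (fun cmpt e =>
      if (PySem.List.count output e : Int) ≥ 1 then
        if cmpt = 0 then cmpt + 1 else cmpt * 2
      else cmpt)
    0

-- ===== PORT B =====
-- B: count the matching elements (sum of 1 over the filtered input), then return 0 or 2^(k-1) in closed form.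
def check_alt (input : List Int) (output : List Int) : Int :=
  let k : Nat := input.countP (fun e => (PySem.List.count output e : Int) ≥ 1)
  if k = 0 then 0 else (2 : Int) ^ (k - 1)

-- ===== PRECONDITION & SPEC =====
def Spec_check (input : List Int) (output : List Int) (out : Int) : Prop := out = check_alt input output
instance (input : List Int) (output : List Int) (out : Int) : Decidable (Spec_check input output out) := by unfold Spec_check; infer_instance

-- ===== CLAIM (what is proved, stated in full; the proofs are below) =====
def Claim_equal_check : Prop := ∀ (input : List Int) (output : List Int), Dom_check input output → Spec_check input output (check input output)

-- ===== LEMMAS AND PROOFS =====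
def pvG (k : Nat) : Int := if k = 0 then 0 else (2 : Int) ^ (k - 1)

theorem pvG_succ (k : Nat) :
    (if pvG k = 0 then pvG k + 1 else pvG k * 2) = pvG (k + 1) := by
  cases k with
  | zero => simp [pvG]
  | succ n =>
    have h2 : ((2 : Int) ^ n) ≠ 0 := pow_ne_zero n (by norm_num)
    simp [pvG, h2, pow_succ]

theorem check_loop (output : List Int) (l : List Int) (k : Nat) :
    l.foldl
      (fun cmpt e =>
        if (PySem.List.count output e : Int) ≥ 1 then
          if cmpt = 0 then cmpt + 1 else cmpt * 2
        else cmpt)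
      (pvG k)
    = pvG (k + l.countP (fun e => (PySem.List.count output e : Int) ≥ 1)) := by
  induction l generalizing k with
  | nil => simp
  | cons a t ih =>
    have hmem : ((PySem.List.count output a : Int) ≥ 1) ↔ a ∈ output := by
      simp [PySem.List.count]
    by_cases h : (PySem.List.count output a : Int) ≥ 1
    · have hm : a ∈ output := hmem.mp h
      simp only [List.foldl_cons, if_pos h, pvG_succ, ih (k + 1)]
      simp only [List.countP_cons, hmem, hm, decide_true, if_true]
      congr 1
      omega
    · have hm : a ∉ output := fun hx => h (hmem.mpr hx)
      simp only [List.foldl_cons, if_neg h, ih k]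
      simp [List.countP_cons, hmem, hm]

-- ===== VERDICT (by name: the statement is the Claim_ definition above) =====
theorem check_spec : Claim_equal_check := by
  intro input output _
  unfold Spec_check check check_alt
  have := check_loop output input 0
  simpa [pvG] using this
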